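-- pv_equiv track=rewrite | github.com/koshiq/DNS-XgBoost-AdBlocker | DNS/dns_feature_extractor.py | _has_ad_ngram
-- ===== SOURCE A (Python) =====
-- def _has_ad_ngram(domain, n):
--     """Check for common ad-related n-grams"""
--     ad_ngrams = {
--         2: ['ad', 'px', 'ds', 'bn', 'tr', 'tk'],  # bigrams
--         3: ['ads', 'trk', 'tag', 'cdn', 'bid', 'clk']  # trigrams
--     }
--
--     if n not in ad_ngrams:
--         return 0
--
--     for i in range(len(domain) - n + 1):
--         if domain[i:i+n] in ad_ngrams[n]:
--             return 1
--     return 0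
-- ===== SOURCE B (Python) =====
-- def _has_ad_ngram(domain, n):
--     """Check for common ad-related n-grams"""
--     if n == 2:
--         pats = ('ad', 'px', 'ds', 'bn', 'tr', 'tk')
--     elif n == 3:
--         pats = ('ads', 'trk', 'tag', 'cdn', 'bid', 'clk')
--     else:
--         return 0
--     s = domain
--     while s:
--         if s.startswith(pats):
--             return 1
--         s = s[1:]
--     return 0
-- ===== Notes on version B (the rewrite author's own statement) =====
-- stated objective: alternative
-- what changed: B drops the dict and range/slice window enumeration: an if/elif picks a pattern tuple and a suffix loop (s = s[1:]) tests str.startswith against all patterns at once, which is equivalent because every pattern has length exactly n.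
import Mathlib
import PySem

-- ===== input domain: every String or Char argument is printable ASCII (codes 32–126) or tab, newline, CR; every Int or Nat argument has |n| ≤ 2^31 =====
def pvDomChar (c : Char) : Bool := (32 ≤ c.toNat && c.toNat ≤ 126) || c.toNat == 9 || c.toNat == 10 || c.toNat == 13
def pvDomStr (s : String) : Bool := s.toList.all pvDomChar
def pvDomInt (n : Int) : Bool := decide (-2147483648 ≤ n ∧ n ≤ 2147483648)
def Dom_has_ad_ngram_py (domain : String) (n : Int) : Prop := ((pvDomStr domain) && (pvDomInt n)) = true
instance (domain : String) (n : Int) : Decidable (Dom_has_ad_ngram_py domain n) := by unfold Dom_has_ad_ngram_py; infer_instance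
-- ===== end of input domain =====

-- B replaces A's dict + per-position range/slice window scan with an if/elif pattern choice and a
-- suffix loop testing startswith against the patterns; objective: alternative decomposition.

-- ===== PORT A =====
def pvAdNgrams : PySem.Dict Int (List String) :=
  (PySem.Dict.empty.insert 2 ["ad", "px", "ds", "bn", "tr", "tk"]).insert 3
    ["ads", "trk", "tag", "cdn", "bid", "clk"]

-- 'for i in range(len(domain) - n + 1): if domain[i:i+n] in ad_ngrams[n]: return 1' / 'return 0'
-- (the loop body only ever returns 1, so the early-return loop is List.any over the range)
def has_ad_ngram_py (domain : String) (n : Int) : Int :=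
  match pvAdNgrams.get? n with
  | none => 0
  | some pats =>
      if (PySem.List.pyRange 0 (PySem.Str.len domain - n + 1)).any
           (fun i => pats.contains (PySem.Str.slice domain (some i) (some (i + n)))) then 1
      else 0

-- ===== PORT B =====
-- 'while s: if s.startswith(pats): return 1; s = s[1:]' — structural recursion on the suffix
def pvScanAd (pats : List String) : List Char → Int
  | [] => 0
  | c :: rest =>
      if pats.any (fun p => p.toList.isPrefixOf (c :: rest)) then 1 else pvScanAd pats rest

def has_ad_ngram_py_alt (domain : String) (n : Int) : Int :=
  if n = 2 then pvScanAd ["ad", "px", "ds", "bn", "tr", "tk"] domain.toList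
  else if n = 3 then pvScanAd ["ads", "trk", "tag", "cdn", "bid", "clk"] domain.toList
  else 0

-- ===== PRECONDITION & SPEC =====
def Spec_has_ad_ngram_py (domain : String) (n : Int) (out : Int) : Prop := out = has_ad_ngram_py_alt domain n
instance (domain : String) (n : Int) (out : Int) : Decidable (Spec_has_ad_ngram_py domain n out) := by unfold Spec_has_ad_ngram_py; infer_instance

-- ===== CLAIM (what is proved, stated in full; the proofs are below) =====
def Claim_equal_has_ad_ngram_py : Prop := ∀ (domain : String) (n : Int), Dom_has_ad_ngram_py domain n → Spec_has_ad_ngram_py domain n (has_ad_ngram_py domain n)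

-- ===== LEMMAS AND PROOFS =====

-- A length-n window of L sitting at a valid position is exactly an infix occurrence of p in L.
lemma pv_window_iff_infix (L p : List Char) (n : Int) (hn : 0 < n)
    (hp : (p.length : Int) = n) :
    (∃ i : Int, 0 ≤ i ∧ i < (L.length : Int) - n + 1 ∧
      PySem.List.slice L (some i) (some (i + n)) = p) ↔ p <:+: L := by
  constructor
  · rintro ⟨i, h0, _, hsl⟩
    rw [PySem.List.slice_toNat L h0 (by omega)] at hsl
    exact hsl ▸ (((L.drop i.toNat).take_prefix _).isInfix.trans (L.drop_suffix i.toNat).isInfix)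
  · rintro ⟨s, t, rfl⟩
    refine ⟨(s.length : Int), by positivity, ?_, ?_⟩
    · have := List.length_append (as := s ++ p) (bs := t)
      simp only [List.length_append] at *
      omega
    · rw [PySem.List.slice_toNat _ (by positivity) (by omega)]
      have h1 : ((s.length : Int)).toNat = s.length := by omega
      have h2 : ((s.length : Int) + n).toNat - s.length = p.length := by omega
      rw [h1, h2]
      simp

-- A's range-and-slice scan decides 'some pattern occurs as an infix' when every pattern has length n.
lemma pv_any_window_iff (domain : String) (n : Int) (hn : 0 < n) (pats : List String)
    (hall : ∀ p ∈ pats, ((p.toList.length : Int) = n)) :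
    ((PySem.List.pyRange 0 (PySem.Str.len domain - n + 1)).any
       (fun i => pats.contains (PySem.Str.slice domain (some i) (some (i + n)))))
      = pats.any (fun p => decide (p.toList <:+: domain.toList)) := by
  rw [Bool.eq_iff_iff]
  simp only [List.any_eq_true, PySem.List.mem_pyRange_one, List.contains_iff_mem,
    decide_eq_true_eq]
  constructor
  · rintro ⟨i, ⟨h0, _⟩, hmem⟩
    refine ⟨_, hmem, ?_⟩
    rw [PySem.Str.toList_slice, PySem.Chars.slice_eq_listSlice,
      PySem.List.slice_toNat _ h0 (by omega)]
    exact ((domain.toList.drop i.toNat).take_prefix _).isInfix.trans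
      (domain.toList.drop_suffix i.toNat).isInfix
  · rintro ⟨p, hmem, hin⟩
    obtain ⟨i, h0, hlt, hsl⟩ :=
      (pv_window_iff_infix domain.toList p.toList n hn (hall p hmem)).mpr hin
    refine ⟨i, ⟨h0, by rw [PySem.Str.len_eq]; exact hlt⟩, ?_⟩
    have heq : PySem.Str.slice domain (some i) (some (i + n)) = p := by
      rw [← String.toList_inj, PySem.Str.toList_slice, PySem.Chars.slice_eq_listSlice, hsl]
    exact heq ▸ hmem

-- B's suffix scan also decides it (patterns nonempty so the empty suffix never matches).
lemma pv_scan_eq (pats : List String) (hne : ∀ p ∈ pats, p.toList ≠ []) (L : List Char) :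
    pvScanAd pats L = if pats.any (fun p => decide (p.toList <:+: L)) then 1 else 0 := by
  induction L with
  | nil =>
      have : pats.any (fun p => decide (p.toList <:+: ([] : List Char))) = false := by
        simp only [List.any_eq_false, decide_eq_true_eq]
        intro p hp h
        exact hne p hp (List.eq_nil_of_infix_nil h)
      rw [show pvScanAd pats [] = 0 from rfl, this]
      rfl
  | cons c rest ih =>
      rw [pvScanAd]
      by_cases hpre : pats.any (fun p => p.toList.isPrefixOf (c :: rest)) = true
      · rw [if_pos hpre]
        obtain ⟨p, hp, hpf⟩ := List.any_eq_true.mp hpre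
        have : pats.any (fun p => decide (p.toList <:+: (c :: rest))) = true :=
          List.any_eq_true.mpr ⟨p, hp, decide_eq_true
            ((List.isPrefixOf_iff_prefix.mp hpf).isInfix)⟩
        rw [this]; rfl
      · rw [if_neg hpre, ih]
        have hiff : (pats.any (fun p => decide (p.toList <:+: (c :: rest)))) =
            (pats.any (fun p => decide (p.toList <:+: rest))) := by
          apply Bool.eq_iff_iff.mpr
          simp only [List.any_eq_true, decide_eq_true_eq]
          constructor
          · rintro ⟨p, hp, hin⟩
            rcases List.infix_cons_iff.mp hin with h | h
            · exact absurd (List.any_eq_true.mpr ⟨p, hp,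
                List.isPrefixOf_iff_prefix.mpr h⟩) hpre
            · exact ⟨p, hp, h⟩
          · rintro ⟨p, hp, hin⟩
            exact ⟨p, hp, List.infix_cons_iff.mpr (Or.inr hin)⟩
        rw [hiff]

-- ===== VERDICT (by name: the statement is the Claim_ definition above) =====
theorem has_ad_ngram_py_spec : Claim_equal_has_ad_ngram_py := by
  intro domain n _
  unfold Spec_has_ad_ngram_py has_ad_ngram_py
  by_cases h2 : n = 2
  · subst h2
    have hget : pvAdNgrams.get? 2 = some ["ad", "px", "ds", "bn", "tr", "tk"] := by
      rw [pvAdNgrams, PySem.Dict.get?_insert_of_ne _ _ (by decide), PySem.Dict.get?_insert_self]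
    have halt : has_ad_ngram_py_alt domain 2
        = pvScanAd ["ad", "px", "ds", "bn", "tr", "tk"] domain.toList := by
      simp [has_ad_ngram_py_alt]
    simp only [hget]
    rw [halt, pv_scan_eq _ (by decide) domain.toList,
      pv_any_window_iff domain 2 (by omega) _ (by decide)]
  · by_cases h3 : n = 3
    · subst h3
      have hget : pvAdNgrams.get? 3 = some ["ads", "trk", "tag", "cdn", "bid", "clk"] :=
        PySem.Dict.get?_insert_self _ _ _
      have halt : has_ad_ngram_py_alt domain 3
          = pvScanAd ["ads", "trk", "tag", "cdn", "bid", "clk"] domain.toList := by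
        simp [has_ad_ngram_py_alt]
      simp only [hget]
      rw [halt, pv_scan_eq _ (by decide) domain.toList,
        pv_any_window_iff domain 3 (by omega) _ (by decide)]
    · have hget : pvAdNgrams.get? n = none := by
        rw [pvAdNgrams, PySem.Dict.get?_insert_of_ne _ _ h3, PySem.Dict.get?_insert_of_ne _ _ h2,
          PySem.Dict.get?_empty]
      have halt : has_ad_ngram_py_alt domain n = 0 := by
        simp [has_ad_ngram_py_alt, h2, h3]
      simp only [hget, halt]
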